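-- pv_equiv track=rewrite | github.com/nonplayer47361/translator | src/braille_utils.py | validate_braille_str
-- ===== SOURCE A (Python) =====
-- def validate_braille_str(s: str) -> bool:
--     """
--     점자(01문자열) 입력이 올바른지 검증 (6자리 0/1, 공백구분)
--     """
--     cells = s.strip().split()
--     if not cells:
--         return False
--     for cell in cells:
--         if len(cell) != 6 or not all(c in "01" for c in cell):
--             return False
--     return True
-- ===== SOURCE B (Python) =====
-- def validate_braille_str(s: str) -> bool:
--     """
--     점자(01문자열) 입력이 올바른지 검증 (6자리 0/1, 공백구분)
--     Single-pass DFA: no tokenization, just a run counter and a seen flag.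
--     """
--     run = 0
--     seen = False
--     for c in s:
--         if c == "0" or c == "1":
--             run += 1
--             if run > 6:
--                 return False
--         elif c.isspace():
--             if run == 0:
--                 continue
--             if run != 6:
--                 return False
--             seen = True
--             run = 0
--         else:
--             return False
--     if run == 6:
--         return True
--     return seen and run == 0
-- ===== Notes on version B (the rewrite author's own statement) =====
-- stated objective: alternative
-- what changed: Replaces strip+split tokenization followed by a per-cell length/membership loop with a single left-to-right pass of a finite automaton that maintains only a run counter and a seen flag (no list of cells is ever built), with early exit on the first violation.
import Mathlib
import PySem

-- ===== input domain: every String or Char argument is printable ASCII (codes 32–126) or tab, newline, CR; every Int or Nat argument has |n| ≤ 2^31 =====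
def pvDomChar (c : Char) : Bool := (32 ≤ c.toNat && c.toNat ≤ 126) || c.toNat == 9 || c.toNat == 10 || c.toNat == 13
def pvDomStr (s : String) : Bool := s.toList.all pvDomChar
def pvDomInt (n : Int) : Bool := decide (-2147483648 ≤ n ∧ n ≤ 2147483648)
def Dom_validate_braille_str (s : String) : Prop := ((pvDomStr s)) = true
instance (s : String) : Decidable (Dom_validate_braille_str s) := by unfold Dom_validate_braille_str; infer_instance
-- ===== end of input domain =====

-- B replaces strip+split tokenization and a per-cell check loop with a single-pass
-- finite automaton keeping only a run counter and a seen flag (alternative, same cost).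


-- ===== PORT A =====
-- cells = s.strip().split(); if not cells: return False; for cell: length-6 and all chars in "01"
def validate_braille_str (s : String) : Bool :=
  let cells := PySem.Str.split₀ (PySem.Str.strip s)
  if cells.isEmpty then false
  else cells.all (fun cell => PySem.Str.len cell == 6 && cell.toList.all (fun c => "01".toList.contains c))

-- ===== PORT B =====
-- the loop of Source B: run counter, seen flag, early-exit on first violation
def pvAltGo : List Char → Int → Bool → Bool
  | [], run, seen => if run = 6 then true else seen && decide (run = 0)
  | c :: rest, run, seen =>
    if c == '0' || c == '1' then
      if run + 1 > 6 then false else pvAltGo rest (run + 1) seen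
    else if PySem.Chars.isspace c then
      if run = 0 then pvAltGo rest run seen
      else if run ≠ 6 then false
      else pvAltGo rest 0 true
    else false

def validate_braille_str_alt (s : String) : Bool := pvAltGo s.toList 0 false

-- ===== PRECONDITION & SPEC =====
def Spec_validate_braille_str (s : String) (out : Bool) : Prop := out = validate_braille_str_alt s
instance (s : String) (out : Bool) : Decidable (Spec_validate_braille_str s out) := by unfold Spec_validate_braille_str; infer_instance

-- ===== CLAIM (what is proved, stated in full; the proofs are below) =====
def Claim_equal_validate_braille_str : Prop := ∀ (s : String), Dom_validate_braille_str s → Spec_validate_braille_str s (validate_braille_str s)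

-- ===== LEMMAS AND PROOFS =====

-- A's per-cell check, on the list side
def pvCellOK (w : List Char) : Bool := (w.length : Int) == 6 && w.all (fun c => "01".toList.contains c)

-- A's final value, on the list side
def pvAFin (cells : List (List Char)) : Bool :=
  if cells.isEmpty then false else cells.all pvCellOK

lemma pv_A_eq_list (s : String) :
    validate_braille_str s = pvAFin (PySem.Chars.split₀ (PySem.Chars.strip s.toList)) := by
  simp only [validate_braille_str, pvAFin, PySem.Str.split₀, PySem.Str.strip,
    String.toList_ofList, List.isEmpty_map, List.all_map]
  congr 1
  apply List.all_congr rfl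
  intro w
  simp [pvCellOK, PySem.Str.len_eq]

lemma go_mem_acc (rest : List Char) : ∀ (cur : List Char) (acc : List (List Char)) (w : List Char),
    w ∈ acc → w ∈ PySem.Chars.split₀.go rest cur acc := by
  induction rest with
  | nil =>
    intro cur acc w hw
    simp only [PySem.Chars.split₀.go]
    split <;> simp_all
  | cons c rest ih =>
    intro cur acc w hw
    simp only [PySem.Chars.split₀.go]
    split
    · split
      · exact ih _ _ _ hw
      · exact ih _ _ _ (List.mem_cons_of_mem _ hw)
    · exact ih _ _ _ hw

lemma go_mem_cur (rest : List Char) : ∀ (cur : List Char) (acc : List (List Char)),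
    cur ≠ [] → ∃ w ∈ PySem.Chars.split₀.go rest cur acc, cur.reverse <+: w := by
  induction rest with
  | nil =>
    intro cur acc hcur
    simp only [PySem.Chars.split₀.go]
    rw [if_neg (by simpa using hcur)]
    exact ⟨cur.reverse, by simp, List.prefix_refl _⟩
  | cons c rest ih =>
    intro cur acc hcur
    simp only [PySem.Chars.split₀.go]
    split
    · rw [if_neg (by simpa using hcur)]
      exact ⟨cur.reverse, go_mem_acc _ _ _ _ (by simp), List.prefix_refl _⟩
    · obtain ⟨w, hw, hp⟩ := ih (c :: cur) acc (by simp)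
      exact ⟨w, hw, List.IsPrefix.trans ⟨[c], by simp⟩ hp⟩

lemma afin_false {cells : List (List Char)} {w : List Char}
    (hw : w ∈ cells) (hbad : pvCellOK w = false) : pvAFin cells = false := by
  unfold pvAFin
  split
  · rfl
  · exact List.all_eq_false.mpr ⟨w, hw, by simp [hbad]⟩

lemma pvAFin_snoc (acc : List (List Char)) (w : List Char) :
    pvAFin ((w :: acc).reverse) = (acc.all pvCellOK && pvCellOK w) := by
  simp [pvAFin, Bool.and_comm]

lemma space_not_bit {c : Char} (hs : PySem.Chars.isspace c = true) :
    (c == '0' || c == '1') = false := by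
  rcases Bool.eq_false_or_eq_true (c == '0' || c == '1') with h | h
  · exfalso
    simp only [Bool.or_eq_true, beq_iff_eq] at h
    rcases h with rfl | rfl <;> exact absurd hs (by decide)
  · exact h

lemma pv_main (rest : List Char) : ∀ (cur : List Char) (acc : List (List Char)),
    cur.all (fun c => "01".toList.contains c) = true → cur.length ≤ 6 →
    acc.all pvCellOK = true →
    pvAFin (PySem.Chars.split₀.go rest cur acc) = pvAltGo rest (cur.length : Int) (!acc.isEmpty) := by
  induction rest with
  | nil =>
    intro cur acc hbits hlen hacc
    simp only [PySem.Chars.split₀.go, pvAltGo]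
    by_cases hcur : cur = []
    · subst hcur
      rw [if_pos (by simp), if_neg (by simp : ¬ ((([] : List Char).length : Int) = 6))]
      cases acc with
      | nil => simp [pvAFin]
      | cons a as =>
        have h1 : ((a :: as).reverse).all pvCellOK = true := by
          rw [List.all_reverse]; exact hacc
        simp only [pvAFin]
        rw [h1]
        simp
    · have hlpos : 0 < cur.length := List.length_pos_iff.mpr hcur
      rw [if_neg (by simpa using hcur), pvAFin_snoc, hacc]
      by_cases h6 : cur.length = 6
      · rw [if_pos (by omega : ((cur.length : Int) = 6))]
        simpa [pvCellOK, List.all_reverse, h6] using hbits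
      · rw [if_neg (by omega : ¬ ((cur.length : Int) = 6))]
        have hbad : pvCellOK cur.reverse = false := by
          simp [pvCellOK]
          omega
        have h0 : ¬ ((cur.length : Int) = 0) := by omega
        simp [hbad]
        exact fun _ => hcur
  | cons c rest ih =>
    intro cur acc hbits hlen hacc
    simp only [PySem.Chars.split₀.go, pvAltGo]
    by_cases hs : PySem.Chars.isspace c = true
    · rw [if_pos hs, space_not_bit hs, if_neg (by simp : ¬ (false = true)), if_pos hs]
      by_cases hcur : cur = []
      · subst hcur
        rw [if_pos (by simp : (([] : List Char).isEmpty = true)),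
          if_pos (by simp : ((([] : List Char).length : Int) = 0))]
        exact ih [] acc rfl (by simp) hacc
      · have hlpos : 0 < cur.length := List.length_pos_iff.mpr hcur
        rw [if_neg (show ¬ (cur.isEmpty = true) by simpa using hcur),
          if_neg (by omega : ¬ ((cur.length : Int) = 0))]
        by_cases h6 : cur.length = 6
        · rw [if_neg (by omega : ¬ ((cur.length : Int) ≠ 6))]
          have hok : pvCellOK cur.reverse = true := by
            simpa [pvCellOK, List.all_reverse, h6] using hbits
          have := ih [] (cur.reverse :: acc) rfl (by simp)
            (by simp [hok, hacc])
          simpa using this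
        · rw [if_pos (by omega : ((cur.length : Int) ≠ 6))]
          exact afin_false (go_mem_acc rest [] (cur.reverse :: acc) cur.reverse (by simp))
            (by simp [pvCellOK]; omega)
    · by_cases hb : (c == '0' || c == '1') = true
      · rw [if_neg hs, if_pos hb]
        by_cases h6 : cur.length = 6
        · rw [if_pos (by omega : ((cur.length : Int) + 1 > 6))]
          obtain ⟨w, hw, hp⟩ := go_mem_cur rest (c :: cur) acc (by simp)
          have hwlen : 7 ≤ w.length := by
            have := hp.length_le
            simp [h6] at this
            omega
          exact afin_false hw (by simp [pvCellOK]; omega)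
        · rw [if_neg (by omega : ¬ ((cur.length : Int) + 1 > 6))]
          have hb' : ("01".toList.contains c) = true := by
            simp only [Bool.or_eq_true, beq_iff_eq] at hb
            simp
            tauto
          have := ih (c :: cur) acc (by simp only [List.all_cons]; rw [hb', hbits]; rfl)
            (by simp; omega) hacc
          rw [this]
          norm_num
      · rw [if_neg hs, if_neg hb, if_neg hs]
        obtain ⟨w, hw, hp⟩ := go_mem_cur rest (c :: cur) acc (by simp)
        have hcw : c ∈ w := hp.mem (by simp)
        apply afin_false hw
        simp only [pvCellOK, Bool.and_eq_false_iff, List.all_eq_false]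
        right
        refine ⟨c, hcw, ?_⟩
        simp only [Bool.or_eq_true, beq_iff_eq] at hb
        simp
        tauto

-- go ignores a fully-space input
lemma go_space_only (t : List Char) (h : ∀ c ∈ t, PySem.Chars.isspace c = true) :
    ∀ (cur : List Char) (acc : List (List Char)),
    PySem.Chars.split₀.go t cur acc = PySem.Chars.split₀.go [] cur acc := by
  induction t with
  | nil => intro cur acc; rfl
  | cons c t ih =>
    intro cur acc
    have hc : PySem.Chars.isspace c = true := h c (by simp)
    have ht : ∀ c ∈ t, PySem.Chars.isspace c = true := fun c hm => h c (by simp [hm])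
    simp only [PySem.Chars.split₀.go, hc, if_pos]
    by_cases hcur : cur = []
    · subst hcur
      rw [if_pos (by simp), ih ht]
      simp [PySem.Chars.split₀.go]
    · rw [if_neg (by simpa using hcur), ih ht]
      simp only [PySem.Chars.split₀.go]
      rw [if_pos (by simp), if_neg (by simpa using hcur)]

lemma go_append_spaces (l t : List Char) (h : ∀ c ∈ t, PySem.Chars.isspace c = true) :
    ∀ (cur : List Char) (acc : List (List Char)),
    PySem.Chars.split₀.go (l ++ t) cur acc = PySem.Chars.split₀.go l cur acc := by
  induction l with
  | nil =>
    intro cur acc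
    simpa using go_space_only t h cur acc
  | cons c l ih =>
    intro cur acc
    simp only [List.cons_append, PySem.Chars.split₀.go]
    split
    · split
      · exact ih _ _
      · exact ih _ _
    · exact ih _ _

lemma go_prepend_spaces (t : List Char) (h : ∀ c ∈ t, PySem.Chars.isspace c = true) :
    ∀ (l : List Char) (acc : List (List Char)),
    PySem.Chars.split₀.go (t ++ l) [] acc = PySem.Chars.split₀.go l [] acc := by
  induction t with
  | nil => intro l acc; rfl
  | cons c t ih =>
    intro l acc
    have hc : PySem.Chars.isspace c = true := h c (by simp)
    simp only [List.cons_append, PySem.Chars.split₀.go, hc, if_pos]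
    rw [if_pos (by simp)]
    exact ih (fun c hm => h c (by simp [hm])) l acc

lemma split₀_strip (l : List Char) :
    PySem.Chars.split₀ (PySem.Chars.strip l) = PySem.Chars.split₀ l := by
  unfold PySem.Chars.split₀ PySem.Chars.strip PySem.Chars.rstrip PySem.Chars.lstrip
  have h1 : PySem.Chars.split₀.go (List.dropWhile PySem.Chars.isspace l) [] [] =
      PySem.Chars.split₀.go l [] [] := by
    conv_rhs => rw [← List.takeWhile_append_dropWhile (p := PySem.Chars.isspace) (l := l)]
    rw [go_prepend_spaces _ (fun c hm => List.mem_takeWhile_imp hm)]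
  rw [← h1]
  set m := List.dropWhile PySem.Chars.isspace l with hm
  have hdecomp : m = (List.dropWhile PySem.Chars.isspace m.reverse).reverse ++
      (List.takeWhile PySem.Chars.isspace m.reverse).reverse := by
    conv_lhs => rw [← List.reverse_reverse m,
      ← List.takeWhile_append_dropWhile (p := PySem.Chars.isspace) (l := m.reverse)]
    rw [List.reverse_append]
  conv_rhs => rw [hdecomp]
  rw [go_append_spaces _ _ (fun c hc => List.mem_takeWhile_imp (by simpa using hc))]

-- ===== VERDICT (by name: the statement is the Claim_ definition above) =====
theorem validate_braille_str_spec : Claim_equal_validate_braille_str := by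
  intro s _
  unfold Spec_validate_braille_str
  rw [pv_A_eq_list, split₀_strip]
  have := pv_main s.toList [] [] (by simp) (by simp) (by simp)
  simpa [validate_braille_str_alt, PySem.Chars.split₀] using this
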